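-- pv_equiv track=rewrite | github.com/rqzz/Anwendungsprojekt-Code_Classification | TrainingData/ai_PRIMES2_2.py | chef_conjecture
-- ===== SOURCE A (Python) =====
-- from math import sqrt
--
-- def is_prime(n):
--     if n < 2:
--         return False
--     for i in range(2, int(sqrt(n)) + 1):
--         if n % i == 0:
--             return False
--     return True
--
-- def chef_conjecture(n):
--     primes = [i for i in range(2, n) if is_prime(i)]
--     for i in primes:
--         for j in primes:
--             for k in primes:
--                 if i + j**2 + k**3 == n:
--                     return i, j, k
--     return 0, 0, 0
-- ===== SOURCE B (Python) =====
-- from math import isqrt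
--
--
-- def _is_prime(m):
--     if m < 2:
--         return False
--     d = 2
--     while d * d <= m:
--         if m % d == 0:
--             return False
--         d += 1
--     return True
--
--
-- def chef_conjecture(n):
--     # one while-loop pass collects the primes and a cube -> prime-root index;
--     # the search is then a double loop with an O(1) lookup for k (no third loop)
--     primes = []
--     cube_root = {}
--     k = 2
--     while k < n:
--         if _is_prime(k):
--             primes.append(k)
--             cube_root[k * k * k] = k
--         k += 1
--     for i in primes:
--         for j in primes:
--             k = cube_root.get(n - i - j * j)
--             if k is not None:
--                 return i, j, k
--     return 0, 0, 0
-- ===== Notes on version B (the rewrite author's own statement) =====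
-- stated objective: faster
-- what changed: A's third nested loop over candidate primes k disappears: B's single build pass collects the primes and a cube->prime dictionary at once, and the search is a double loop with an O(1) dictionary lookup for k; primality is tested by a d*d<=m while loop instead of a sqrt-bounded range.
import Mathlib
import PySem

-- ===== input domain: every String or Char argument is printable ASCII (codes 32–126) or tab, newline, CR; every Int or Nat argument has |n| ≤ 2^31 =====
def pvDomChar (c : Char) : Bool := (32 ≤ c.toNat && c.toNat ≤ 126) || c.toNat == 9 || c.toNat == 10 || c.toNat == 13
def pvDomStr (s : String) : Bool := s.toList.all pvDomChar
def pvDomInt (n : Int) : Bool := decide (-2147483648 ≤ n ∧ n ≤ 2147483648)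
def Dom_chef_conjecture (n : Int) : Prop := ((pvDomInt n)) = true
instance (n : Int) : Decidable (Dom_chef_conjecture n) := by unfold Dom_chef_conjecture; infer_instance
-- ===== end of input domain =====

-- B removes A's innermost loop: it builds a cube->prime index in one pass, then a fused
-- double loop over i, j with an O(1) lookup for k (objective: faster).
-- Python's tuple result (i, j, k) is rendered as the list [i, j, k] per the task signature.

-- ===== PORT A =====
-- is_prime: trial division up to int(sqrt(m)) (math.sqrt is exact on this |n| ≤ 2^31 domain, so int(sqrt(m)) = Nat.sqrt).
def pvIsPrime (m : Int) : Bool :=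
  if m < 2 then false
  else !((PySem.List.pyRange 2 ((Nat.sqrt m.toNat : Int) + 1) 1).any
          (fun i => PySem.Int.mod m i == 0))

def chef_conjecture (n : Int) : List Int :=
  let primes := (PySem.List.pyRange 2 n 1).filter (fun i => pvIsPrime i)
  match primes.findSome? (fun i => primes.findSome? (fun j => primes.findSome? (fun k =>
          if i + j ^ 2 + k ^ 3 == n then some [i, j, k] else none))) with
  | some r => r
  | none => [0, 0, 0]

-- ===== PORT B =====
-- _is_prime: 'while d * d <= m' trial division; the Nat fuel only bounds the while loop
-- (m.toNat iterations always suffice), it changes no computed value.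
def pvTrial (m d : Int) : Nat → Bool
  | 0 => true
  | fuel + 1 =>
      if d * d ≤ m then
        (if PySem.Int.mod m d == 0 then false else pvTrial m (d + 1) fuel)
      else true

def pvIsPrimeB (m : Int) : Bool :=
  if m < 2 then false else pvTrial m 2 m.toNat

-- single 'while k < n' pass collecting primes and filling cube_root; fuel (n-2).toNat bounds the loop.
def pvBuildPrimes (n k : Int) (ps : List Int) (cr : PySem.Dict Int Int) :
    Nat → List Int × PySem.Dict Int Int
  | 0 => (ps, cr)
  | fuel + 1 =>
      if k < n then
        (if pvIsPrimeB k then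
           pvBuildPrimes n (k + 1) (ps ++ [k]) (cr.insert (k * k * k) k) fuel
         else pvBuildPrimes n (k + 1) ps cr fuel)
      else (ps, cr)

-- inner 'for j in primes' loop of the search
def pvLookupJ (n i : Int) (cr : PySem.Dict Int Int) : List Int → Option (List Int)
  | [] => none
  | j :: js =>
      match cr.get? (n - i - j * j) with
      | some k => some [i, j, k]
      | none => pvLookupJ n i cr js

-- outer 'for i in primes' loop of the search
def pvLookupI (n : Int) (ps : List Int) (cr : PySem.Dict Int Int) : List Int → Option (List Int)
  | [] => none
  | i :: is =>
      match pvLookupJ n i cr ps with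
      | some r => some r
      | none => pvLookupI n ps cr is

def chef_conjecture_alt (n : Int) : List Int :=
  let pc := pvBuildPrimes n 2 [] PySem.Dict.empty (n - 2).toNat
  match pvLookupI n pc.1 pc.2 pc.1 with
  | some r => r
  | none => [0, 0, 0]

-- ===== PRECONDITION & SPEC =====
def Spec_chef_conjecture (n : Int) (out : List Int) : Prop := out = chef_conjecture_alt n
instance (n : Int) (out : List Int) : Decidable (Spec_chef_conjecture n out) := by unfold Spec_chef_conjecture; infer_instance

-- ===== CLAIM (what is proved, stated in full; the proofs are below) =====
def Claim_equal_chef_conjecture : Prop := ∀ (n : Int), Dom_chef_conjecture n → Spec_chef_conjecture n (chef_conjecture n)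

-- ===== LEMMAS AND PROOFS =====

-- B's while-loop trial division decides "no divisor d ≤ e with e*e ≤ m"
theorem pvTrial_iff (m : Int) : ∀ (fuel : Nat) (d : Int), 1 ≤ d → m < (d + fuel) * (d + fuel) →
    (pvTrial m d fuel = true ↔ ∀ e : Int, d ≤ e → e * e ≤ m → ¬(PySem.Int.mod m e == 0) = true) := by
  intro fuel
  induction fuel with
  | zero =>
      intro d hd hm
      simp only [Nat.cast_zero, add_zero] at hm
      simp only [pvTrial, true_iff]
      intro e he hee
      exact absurd hee (by nlinarith)
  | succ fuel ih =>
      intro d hd hm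
      simp only [pvTrial]
      by_cases hdd : d * d ≤ m
      · simp only [if_pos hdd]
        by_cases hmod : (PySem.Int.mod m d == 0) = true
        · simp only [if_pos hmod]
          constructor
          · intro h; exact absurd h (by simp)
          · intro h; exact absurd hmod (h d le_rfl hdd)
        · simp only [if_neg hmod]
          rw [ih (d + 1) (by omega) (by push_cast at hm ⊢; nlinarith)]
          constructor
          · intro h e he hee
            rcases eq_or_lt_of_le he with rfl | hlt
            · exact hmod
            · exact h e (by omega) hee
          · intro h e he hee
            exact h e (by omega) hee
      · simp only [if_neg hdd, true_iff]
        intro e he hee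
        exact absurd hee (by nlinarith [not_le.mp hdd])

theorem pvIsPrimeB_char (m : Int) :
    pvIsPrimeB m = true ↔ 2 ≤ m ∧ ∀ e : Int, 2 ≤ e → e * e ≤ m → ¬(PySem.Int.mod m e == 0) = true := by
  unfold pvIsPrimeB
  by_cases h2 : m < 2
  · simp only [if_pos h2]
    constructor
    · intro h; exact absurd h (by simp)
    · intro h; omega
  · simp only [if_neg h2]
    rw [pvTrial_iff m m.toNat 2 (by omega) (by
      have : (m.toNat : Int) = m := by omega
      nlinarith [this])]
    constructor
    · intro h; exact ⟨by omega, h⟩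
    · intro h; exact h.2

theorem pvIsPrime_char (m : Int) :
    pvIsPrime m = true ↔ 2 ≤ m ∧ ∀ e : Int, 2 ≤ e → e * e ≤ m → ¬(PySem.Int.mod m e == 0) = true := by
  unfold pvIsPrime
  by_cases h2 : m < 2
  · simp only [if_pos h2]
    constructor
    · intro h; exact absurd h (by simp)
    · intro h; omega
  · simp only [if_neg h2, Bool.not_eq_eq_eq_not, Bool.not_true, List.any_eq_false]
    constructor
    · intro h
      refine ⟨by omega, ?_⟩
      intro e he hee
      apply h
      rw [PySem.List.mem_pyRange_one]
      refine ⟨he, ?_⟩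
      have he' : (e.toNat : Int) = e := by omega
      have hsq : e.toNat ≤ Nat.sqrt m.toNat := by
        rw [Nat.le_sqrt]
        zify
        rw [he']
        omega
      omega
    · intro h x hx
      rw [PySem.List.mem_pyRange_one] at hx
      apply h.2 x hx.1
      have hle : x.toNat ≤ Nat.sqrt m.toNat := by omega
      have hx' : (x.toNat : Int) = x := by omega
      have h2' : ((x.toNat : Nat) : Int) * ((x.toNat : Nat) : Int) ≤ ((m.toNat : Nat) : Int) := by
        exact_mod_cast Nat.le_sqrt.mp hle
      rw [hx'] at h2'
      omega

theorem pvIsPrimeB_eq_pvIsPrime : pvIsPrimeB = pvIsPrime := by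
  funext m
  rw [Bool.eq_iff_iff, pvIsPrimeB_char, pvIsPrime_char]

-- the cube map is injective on Int
theorem pvCubeInj : Function.Injective (fun k : Int => k * k * k) := by
  intro a b h
  simp only at h
  nlinarith [sq_nonneg (a - b), sq_nonneg (a + b), sq_nonneg a, sq_nonneg b]

-- findSome? over a guarded some is find? then map
theorem pvFindSome_guard {α β : Type} (L : List α) (p : α → Bool) (f : α → β) :
    L.findSome? (fun x => if p x then some (f x) else none) = (L.find? p).map f := by
  induction L with
  | nil => rfl
  | cons a t ih =>
      by_cases h : p a = true <;> simp [List.findSome?, List.find?, h, ih]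

-- lookup in the cube->prime dict built over a list with distinct cubes is find? over that list
theorem pvGetCubes (L : List Int) (h : (L.map (fun k => k * k * k)).Nodup) (r : Int) :
    (L.foldl (fun d k => d.insert (k * k * k) k) PySem.Dict.empty).get? r
      = L.find? (fun k => k * k * k == r) := by
  have hitems : (L.foldl (fun d k => d.insert (k * k * k) k) PySem.Dict.empty).items
      = L.map (fun k => (k * k * k, k)) := by
    have := PySem.Dict.items_foldl_insert_fresh (l := L) (d := PySem.Dict.empty)
      (k := fun k => k * k * k) (v := fun k => k) (by intro a _; rfl) h
    simpa using this
  have hd : (L.foldl (fun d k => d.insert (k * k * k) k) PySem.Dict.empty)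
      = PySem.Dict.mk (L.map (fun k => (k * k * k, k))) := by
    apply PySem.Dict.ext; simpa using hitems
  rw [hd]
  clear hitems hd h
  induction L with
  | nil => rfl
  | cons a t ih =>
      simp only [List.map_cons, List.find?]
      rw [PySem.Dict.get?_mk_cons]
      by_cases hc : (a * a * a == r) = true
      · simp [hc]
      · simp [hc, ih]

-- A's inner k-loop over the prime list equals the dict lookup, for every i, j
theorem pvInnerEq (n i j : Int) (L : List Int) (h : (L.map (fun k => k * k * k)).Nodup) :
    L.findSome? (fun k => if i + j ^ 2 + k ^ 3 == n then some [i, j, k] else none)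
      = (match (L.foldl (fun d k => d.insert (k * k * k) k) PySem.Dict.empty).get? (n - i - j * j) with
         | some k => some [i, j, k]
         | none => none) := by
  rw [pvGetCubes L h, pvFindSome_guard]
  have hp : (fun k : Int => i + j ^ 2 + k ^ 3 == n) = (fun k : Int => k * k * k == n - i - j * j) := by
    funext k
    have e1 : i + j ^ 2 + k ^ 3 = i + j * j + k * k * k := by ring
    rcases eq_or_ne (k * k * k) (n - i - j * j) with he | he
    · have : i + j ^ 2 + k ^ 3 = n := by rw [e1]; omega
      simp [this, he]
    · have : i + j ^ 2 + k ^ 3 ≠ n := by rw [e1]; omega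
      simp [this, he]
  rw [hp]
  cases L.find? (fun k : Int => k * k * k == n - i - j * j) <;> rfl

-- cubes of the filtered range are pairwise distinct
theorem pvPrimesCubesNodup (n : Int) :
    (((PySem.List.pyRange 2 n 1).filter (fun i => pvIsPrime i)).map (fun k => k * k * k)).Nodup := by
  exact List.Nodup.map pvCubeInj (List.Nodup.filter _ (PySem.List.nodup_pyRange_one 2 n))

-- B's build pass appends the filtered range to the primes and folds the inserts into the dict
theorem pvBuildPrimes_eq (n : Int) : ∀ (fuel : Nat) (k : Int) (ps : List Int) (cr : PySem.Dict Int Int),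
    n - k ≤ (fuel : Int) →
    pvBuildPrimes n k ps cr fuel
      = (ps ++ (PySem.List.pyRange k n 1).filter (fun i => pvIsPrimeB i),
         ((PySem.List.pyRange k n 1).filter (fun i => pvIsPrimeB i)).foldl
           (fun d k => d.insert (k * k * k) k) cr) := by
  intro fuel
  induction fuel with
  | zero =>
      intro k ps cr h
      rw [PySem.List.pyRange_one_eq_nil (by push_cast at h; omega)]
      simp [pvBuildPrimes]
  | succ fuel ih =>
      intro k ps cr h
      simp only [pvBuildPrimes]
      by_cases hk : k < n
      · rw [if_pos hk, PySem.List.pyRange_one_cons hk, List.filter_cons]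
        by_cases hp : pvIsPrimeB k = true
        · simp only [hp, if_pos, List.foldl_cons]
          rw [ih (k + 1) (ps ++ [k]) (cr.insert (k * k * k) k) (by push_cast at h ⊢; omega)]
          simp
        · simp only [hp]
          exact ih (k + 1) ps cr (by push_cast at h ⊢; omega)
      · rw [if_neg hk, PySem.List.pyRange_one_eq_nil (by omega)]
        simp
  
-- B's inner for loop is findSome? of the lookup body
theorem pvLookupJ_eq (n i : Int) (cr : PySem.Dict Int Int) (L : List Int) :
    pvLookupJ n i cr L
      = L.findSome? (fun j => match cr.get? (n - i - j * j) with
                              | some k => some [i, j, k]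
                              | none => none) := by
  induction L with
  | nil => rfl
  | cons j js ih =>
      simp only [pvLookupJ, List.findSome?_cons]
      cases cr.get? (n - i - j * j) with
      | some k => rfl
      | none => exact ih

-- B's outer for loop is the nested findSome?
theorem pvLookupI_eq (n : Int) (ps : List Int) (cr : PySem.Dict Int Int) (L : List Int) :
    pvLookupI n ps cr L
      = L.findSome? (fun i => ps.findSome?
          (fun j => match cr.get? (n - i - j * j) with
                    | some k => some [i, j, k]
                    | none => none)) := by
  induction L with
  | nil => rfl
  | cons i is ih =>
      simp only [pvLookupI, List.findSome?_cons, pvLookupJ_eq]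
      cases ps.findSome? (fun j => match cr.get? (n - i - j * j) with
                                   | some k => some [i, j, k]
                                   | none => none) with
      | some r => rfl
      | none => exact ih

-- ===== VERDICT (by name: the statement is the Claim_ definition above) =====
theorem chef_conjecture_spec : Claim_equal_chef_conjecture := by
  intro n _
  unfold Spec_chef_conjecture
  simp only [chef_conjecture, chef_conjecture_alt]
  rw [pvBuildPrimes_eq n (n - 2).toNat 2 [] PySem.Dict.empty (by omega)]
  simp only [List.nil_append, pvLookupI_eq, pvIsPrimeB_eq_pvIsPrime]
  have h := pvPrimesCubesNodup n
  set primes := (PySem.List.pyRange 2 n 1).filter (fun i => pvIsPrime i) with hp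
  have heq : (fun i => primes.findSome? (fun j => primes.findSome? (fun k =>
            if i + j ^ 2 + k ^ 3 == n then some [i, j, k] else none)))
       = (fun i => primes.findSome? (fun j =>
            match (primes.foldl (fun d k => d.insert (k * k * k) k) PySem.Dict.empty).get?
                (n - i - j * j) with
            | some k => some [i, j, k]
            | none => none)) := by
    funext i
    congr 1
    funext j
    exact pvInnerEq n i j primes h
  simp only [heq]
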